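-- pv_equiv track=rewrite | github.com/allenai/papermage | papermage/predictors/word_predictors.py | _group_adjacent_with_exceptions
-- ===== SOURCE A (Python) =====
-- from typing import Dict, List, Set, Tuple, Union
--
-- def _group_adjacent_with_exceptions(adjacent: List[int], exception_ids: Set[int]) -> List[List[int]]:
--     result = []
--     group = []
--     for e in adjacent:
--         if e in exception_ids:
--             if group:
--                 result.append(group)
--             result.append([e])
--             group = []
--         else:
--             group.append(e)
--     if group:
--         result.append(group)
--     return result
-- ===== SOURCE B (Python) =====
-- from typing import Dict, List, Set, Tuple, Union
--
-- def _group_adjacent_with_exceptions(adjacent: List[int], exception_ids: Set[int]) -> List[List[int]]: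
--     result = []
--     i = 0
--     n = len(adjacent)
--     while i < n:
--         if adjacent[i] in exception_ids:
--             result.append([adjacent[i]])
--             i += 1
--         else:
--             j = i + 1
--             while j < n and adjacent[j] not in exception_ids:
--                 j += 1
--             result.append(adjacent[i:j])
--             i = j
--     return result
-- ===== Notes on version B (the rewrite author's own statement) =====
-- stated objective: alternative
-- what changed: Replaces the running-group accumulator with flushes by an index-based run scan: each maximal run of non-exception elements is found with an inner scan and emitted as one slice, exceptions as singletons, so no pending group state or final flush exists.
import Mathlib
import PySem

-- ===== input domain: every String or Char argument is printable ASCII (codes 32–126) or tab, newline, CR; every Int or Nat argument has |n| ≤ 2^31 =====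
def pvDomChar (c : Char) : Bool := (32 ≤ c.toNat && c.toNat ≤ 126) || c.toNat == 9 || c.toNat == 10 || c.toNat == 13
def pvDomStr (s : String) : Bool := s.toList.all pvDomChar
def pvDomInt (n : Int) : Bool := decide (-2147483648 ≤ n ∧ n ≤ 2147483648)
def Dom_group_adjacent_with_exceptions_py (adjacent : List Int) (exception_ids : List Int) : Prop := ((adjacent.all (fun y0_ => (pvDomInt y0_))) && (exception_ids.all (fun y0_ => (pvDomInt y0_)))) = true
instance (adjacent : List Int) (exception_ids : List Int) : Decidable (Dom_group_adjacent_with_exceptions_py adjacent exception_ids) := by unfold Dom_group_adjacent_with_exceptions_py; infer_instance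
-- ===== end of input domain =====

-- B replaces A's running-group-with-flush loop by an index-free run scan (runs emitted as slices); alternative decomposition, same cost.


-- ===== PORT A =====
-- one loop step: state = (result, group)
def pvStepA (exception_ids : List Int) (st : List (List Int) × List Int) (e : Int) :
    List (List Int) × List Int :=
  if exception_ids.contains e then
    ((if st.2.isEmpty then st.1 else st.1 ++ [st.2]) ++ [[e]], ([] : List Int))
  else
    (st.1, st.2 ++ [e])

def group_adjacent_with_exceptions_py (adjacent : List Int) (exception_ids : List Int) : List (List Int) :=
  let st := adjacent.foldl (pvStepA exception_ids) ([], [])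
  if st.2.isEmpty then st.1 else st.1 ++ [st.2]

-- ===== PORT B =====
-- the run scan: an exception gives a singleton; otherwise the inner scan (takeWhile)
-- finds the end of the run and the slice adjacent[i:j] is emitted at once
def pvRunScan (exception_ids : List Int) : List Int → List (List Int)
  | [] => []
  | x :: rest =>
    if exception_ids.contains x then
      [x] :: pvRunScan exception_ids rest
    else
      (x :: rest.takeWhile (fun e => !exception_ids.contains e)) ::
        pvRunScan exception_ids (rest.dropWhile (fun e => !exception_ids.contains e))
termination_by xs => xs.length
decreasing_by
  · simp
  · simpa using Nat.lt_succ_of_le (List.length_dropWhile_le _ rest)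

def group_adjacent_with_exceptions_py_alt (adjacent : List Int) (exception_ids : List Int) : List (List Int) :=
  pvRunScan exception_ids adjacent

-- ===== PRECONDITION & SPEC =====
def Spec_group_adjacent_with_exceptions_py (adjacent : List Int) (exception_ids : List Int) (out : List (List Int)) : Prop := out = group_adjacent_with_exceptions_py_alt adjacent exception_ids
instance (adjacent : List Int) (exception_ids : List Int) (out : List (List Int)) : Decidable (Spec_group_adjacent_with_exceptions_py adjacent exception_ids out) := by unfold Spec_group_adjacent_with_exceptions_py; infer_instance

-- ===== CLAIM (what is proved, stated in full; the proofs are below) =====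
def Claim_equal_group_adjacent_with_exceptions_py : Prop := ∀ (adjacent : List Int) (exception_ids : List Int), Dom_group_adjacent_with_exceptions_py adjacent exception_ids → Spec_group_adjacent_with_exceptions_py adjacent exception_ids (group_adjacent_with_exceptions_py adjacent exception_ids)

-- ===== LEMMAS AND PROOFS =====

-- flushing the final state
def pvFinish (st : List (List Int) × List Int) : List (List Int) :=
  if st.2.isEmpty then st.1 else st.1 ++ [st.2]

-- the accumulated result is a pure prefix of the flushed loop value
theorem pvFinish_prefix (exc : List Int) (xs : List Int) :
    ∀ res grp, pvFinish (xs.foldl (pvStepA exc) (res, grp))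
      = res ++ pvFinish (xs.foldl (pvStepA exc) ([], grp)) := by
  induction xs with
  | nil => intro res grp; simp [pvFinish]; split <;> simp
  | cons e rest ih =>
    intro res grp
    simp only [List.foldl_cons, pvStepA]
    by_cases he : exc.contains e
    · simp only [he, if_pos]
      rw [ih, ih ((if grp.isEmpty then [] else [] ++ [grp]) ++ [[e]])]
      split <;> simp
    · simp only [he, Bool.false_eq_true, if_neg, not_false_eq_true]
      exact ih res (grp ++ [e])

-- A's loop from pending group grp equals: grp (extended by the leading run) glued onto the run scan
theorem pvLoop_eq_scan (exc : List Int) (xs : List Int) :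
    ∀ grp, pvFinish (xs.foldl (pvStepA exc) ([], grp))
      = (if grp.isEmpty then pvRunScan exc xs
         else (grp ++ xs.takeWhile (fun e => !exc.contains e)) ::
              pvRunScan exc (xs.dropWhile (fun e => !exc.contains e))) := by
  induction xs with
  | nil =>
    intro grp
    cases grp <;> simp [pvFinish, pvRunScan]
  | cons e rest ih =>
    intro grp
    simp only [List.foldl_cons, pvStepA]
    by_cases he : exc.contains e
    · simp only [he, if_pos]
      rw [pvFinish_prefix, ih]
      have he' : e ∈ exc := by simpa using he
      cases grp <;>
        simp [pvRunScan, he', List.takeWhile, List.dropWhile]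
    · simp only [he, if_neg, Bool.false_eq_true, not_false_eq_true]
      rw [ih]
      have he' : e ∉ exc := by simpa using he
      cases grp <;>
        simp [pvRunScan, he', List.takeWhile, List.dropWhile]

-- ===== VERDICT (by name: the statement is the Claim_ definition above) =====
theorem group_adjacent_with_exceptions_py_spec : Claim_equal_group_adjacent_with_exceptions_py := by
  intro adjacent exception_ids _
  show _ = _
  have h := pvLoop_eq_scan exception_ids adjacent []
  simpa [group_adjacent_with_exceptions_py, group_adjacent_with_exceptions_py_alt, pvFinish]
    using h
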